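-- pv_equiv track=rewrite | github.com/broadinstitute/gatk-sv | module19_LR_benchmark/scripts/count_vcf_variant_function_summary.py | most_severe_term
-- ===== SOURCE A (Python) =====
-- SEVERITY_ORDER = [
--     "transcript_ablation",
--     "splice_acceptor_variant",
--     "splice_donor_variant",
--     "stop_gained",
--     "frameshift_variant",
--     "stop_lost",
--     "start_lost",
--     "transcript_amplification",
--     "feature_elongation",
--     "feature_truncation",
--     "inframe_insertion",
--     "inframe_deletion",
--     "missense_variant",
--     "protein_altering_variant",
--     "splice_region_variant",
--     "incomplete_terminal_codon_variant",
--     "start_retained_variant",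
--     "stop_retained_variant",
--     "synonymous_variant",
--     "coding_sequence_variant",
--     "mature_miRNA_variant",
--     "5_prime_UTR_variant",
--     "3_prime_UTR_variant",
--     "non_coding_transcript_exon_variant",
--     "intron_variant",
--     "NMD_transcript_variant",
--     "non_coding_transcript_variant",
--     "upstream_gene_variant",
--     "downstream_gene_variant",
--     "TFBS_ablation",
--     "TFBS_amplification",
--     "TF_binding_site_variant",
--     "regulatory_region_ablation",
--     "regulatory_region_amplification",
--     "regulatory_region_variant",
--     "intergenic_variant",
-- ]
--
-- SEVERITY_RANK = {term: i for i, term in enumerate(SEVERITY_ORDER)}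
--
-- def most_severe_term(terms):
--     if not terms:
--         return None
--
--     best = None
--     best_rank = 10**9
--     for term in terms:
--         rank = SEVERITY_RANK.get(term, len(SEVERITY_ORDER) + 100)
--         if rank < best_rank:
--             best_rank = rank
--             best = term
--     return best
-- ===== SOURCE B (Python) =====
-- SEVERITY_ORDER = [
--     "transcript_ablation",
--     "splice_acceptor_variant",
--     "splice_donor_variant",
--     "stop_gained",
--     "frameshift_variant",
--     "stop_lost",
--     "start_lost",
--     "transcript_amplification",
--     "feature_elongation",
--     "feature_truncation",
--     "inframe_insertion",
--     "inframe_deletion",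
--     "missense_variant",
--     "protein_altering_variant",
--     "splice_region_variant",
--     "incomplete_terminal_codon_variant",
--     "start_retained_variant",
--     "stop_retained_variant",
--     "synonymous_variant",
--     "coding_sequence_variant",
--     "mature_miRNA_variant",
--     "5_prime_UTR_variant",
--     "3_prime_UTR_variant",
--     "non_coding_transcript_exon_variant",
--     "intron_variant",
--     "NMD_transcript_variant",
--     "non_coding_transcript_variant",
--     "upstream_gene_variant",
--     "downstream_gene_variant",
--     "TFBS_ablation",
--     "TFBS_amplification",
--     "TF_binding_site_variant",
--     "regulatory_region_ablation",
--     "regulatory_region_amplification",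
--     "regulatory_region_variant",
--     "intergenic_variant",
-- ]
--
--
-- def most_severe_term(terms):
--     if not terms:
--         return None
--     present = set(terms)
--     for term in SEVERITY_ORDER:
--         if term in present:
--             return term
--     return next(iter(terms))
-- ===== Notes on version B (the rewrite author's own statement) =====
-- stated objective: alternative
-- what changed: Instead of scanning the input and tracking the best rank via a dict lookup per element, B builds a set of the input once and scans the fixed SEVERITY_ORDER ranking, returning the first ranked term present (first input element if none is ranked).
import Mathlib
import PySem

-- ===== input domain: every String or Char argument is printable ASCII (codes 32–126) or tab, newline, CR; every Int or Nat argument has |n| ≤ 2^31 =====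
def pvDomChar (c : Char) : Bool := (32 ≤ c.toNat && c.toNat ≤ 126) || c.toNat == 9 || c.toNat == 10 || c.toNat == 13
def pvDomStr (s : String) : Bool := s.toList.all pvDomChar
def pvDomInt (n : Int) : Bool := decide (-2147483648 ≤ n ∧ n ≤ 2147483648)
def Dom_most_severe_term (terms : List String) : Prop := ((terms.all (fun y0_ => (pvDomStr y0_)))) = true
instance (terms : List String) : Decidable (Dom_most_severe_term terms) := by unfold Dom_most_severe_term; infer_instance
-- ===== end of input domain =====

-- B replaces A's per-element best-rank tracking (dict lookup per input element) by one set build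
-- plus a scan of the fixed SEVERITY_ORDER list, returning the first ranked term present.

-- ===== PORT A =====
def SEVERITY_ORDER : List String := [
  "transcript_ablation", "splice_acceptor_variant", "splice_donor_variant", "stop_gained",
  "frameshift_variant", "stop_lost", "start_lost", "transcript_amplification",
  "feature_elongation", "feature_truncation", "inframe_insertion", "inframe_deletion",
  "missense_variant", "protein_altering_variant", "splice_region_variant",
  "incomplete_terminal_codon_variant", "start_retained_variant", "stop_retained_variant",
  "synonymous_variant", "coding_sequence_variant", "mature_miRNA_variant",
  "5_prime_UTR_variant", "3_prime_UTR_variant", "non_coding_transcript_exon_variant",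
  "intron_variant", "NMD_transcript_variant", "non_coding_transcript_variant",
  "upstream_gene_variant", "downstream_gene_variant", "TFBS_ablation", "TFBS_amplification",
  "TF_binding_site_variant", "regulatory_region_ablation", "regulatory_region_amplification",
  "regulatory_region_variant", "intergenic_variant"]

-- SEVERITY_RANK = {term: i for i, term in enumerate(SEVERITY_ORDER)}
def SEVERITY_RANK : PySem.Dict String Int :=
  (PySem.List.enumerate SEVERITY_ORDER).foldl (fun d p => d.insert p.2 p.1) PySem.Dict.empty

def most_severe_term (terms : List String) : Option String :=
  if terms = [] then none
  else
    (terms.foldl (fun (st : Option String × Int) term =>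
        let rank := SEVERITY_RANK.getD term (PySem.List.len SEVERITY_ORDER + 100)
        if rank < st.2 then (some term, rank) else st)
      ((none : Option String), 10 ^ 9)).1

-- ===== PORT B =====
def most_severe_term_alt (terms : List String) : Option String :=
  if terms = [] then none
  else
    match SEVERITY_ORDER.find? (fun t => PySem.Set.contains (PySem.Set.ofList terms) t) with
    | some t => some t
    | none => terms.head?

-- ===== PRECONDITION & SPEC =====
def Spec_most_severe_term (terms : List String) (out : Option String) : Prop := out = most_severe_term_alt terms
instance (terms : List String) (out : Option String) : Decidable (Spec_most_severe_term terms out) := by unfold Spec_most_severe_term; infer_instance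

-- ===== CLAIM (what is proved, stated in full; the proofs are below) =====
def Claim_equal_most_severe_term : Prop := ∀ (terms : List String), Dom_most_severe_term terms → Spec_most_severe_term terms (most_severe_term terms)

-- ===== LEMMAS AND PROOFS =====

-- the rank A's loop computes for one term
def pvRank (s : String) : Int := SEVERITY_RANK.getD s (PySem.List.len SEVERITY_ORDER + 100)

set_option maxRecDepth 40000 in
lemma pvKeys : SEVERITY_RANK.keys = SEVERITY_ORDER := by decide

lemma pvRank_of_not_mem {s : String} (h : s ∉ SEVERITY_ORDER) : pvRank s = 136 := by
  have hc : SEVERITY_RANK.contains s = false := by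
    rw [PySem.Dict.contains_eq_decide_mem_keys, pvKeys]
    simpa using h
  have := PySem.Dict.getD_of_not_contains (d := SEVERITY_RANK)
    (k := s) (d0 := PySem.List.len SEVERITY_ORDER + 100) hc
  simpa [pvRank, PySem.List.len_eq, SEVERITY_ORDER] using this

set_option maxRecDepth 40000 in
lemma pvRank_lt_of_mem' : ∀ s ∈ SEVERITY_ORDER, pvRank s < 136 := by decide

lemma pvRank_lt_of_mem {s : String} (h : s ∈ SEVERITY_ORDER) : pvRank s < 136 :=
  pvRank_lt_of_mem' s h

lemma pvRank_le (s : String) : pvRank s ≤ 136 := by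
  by_cases h : s ∈ SEVERITY_ORDER
  · exact le_of_lt (pvRank_lt_of_mem h)
  · exact le_of_eq (pvRank_of_not_mem h)

lemma pvRank_mem_of_lt {s : String} (h : pvRank s < 136) : s ∈ SEVERITY_ORDER := by
  by_contra hn
  rw [pvRank_of_not_mem hn] at h
  omega

set_option maxRecDepth 40000 in
lemma pvRank_pairwise : SEVERITY_ORDER.Pairwise (fun a b => pvRank a < pvRank b) := by decide

-- on a strictly rank-increasing list, rank determines the element
lemma rank_inj_of_pairwise {l : List String} (hp : l.Pairwise (fun a b => pvRank a < pvRank b)) :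
    ∀ s ∈ l, ∀ t ∈ l, pvRank s = pvRank t → s = t := by
  induction l with
  | nil => intro s hs; cases hs
  | cons a l ih =>
    rcases List.pairwise_cons.mp hp with ⟨ha, hl⟩
    intro s hs t ht h
    rcases List.mem_cons.mp hs with rfl | hs'
    · rcases List.mem_cons.mp ht with rfl | ht'
      · rfl
      · exact absurd h (ne_of_lt (ha _ ht'))
    · rcases List.mem_cons.mp ht with rfl | ht'
      · exact absurd h.symm (ne_of_lt (ha _ hs'))
      · exact ih hl s hs' t ht' h

-- rank is injective on SEVERITY_ORDER
lemma pvRank_inj {s t : String} (hs : s ∈ SEVERITY_ORDER) (ht : t ∈ SEVERITY_ORDER)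
    (h : pvRank s = pvRank t) : s = t :=
  rank_inj_of_pairwise pvRank_pairwise s hs t ht h

-- find? on a rank-sorted list returns a minimal-rank element among those satisfying the predicate
lemma find?_rank_min {l : List String} (hp : l.Pairwise (fun a b => pvRank a < pvRank b))
    {p : String → Bool} {s : String} (hf : l.find? p = some s) :
    ∀ t ∈ l, p t = true → pvRank s ≤ pvRank t := by
  induction l with
  | nil => cases hf
  | cons a l ih =>
    rcases List.pairwise_cons.mp hp with ⟨ha, hl⟩
    intro t ht hpt
    by_cases hpa : p a = true
    · rw [List.find?_cons_of_pos hpa] at hf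
      cases hf
      rcases List.mem_cons.mp ht with rfl | ht
      · exact le_refl _
      · exact le_of_lt (ha _ ht)
    · rw [List.find?_cons_of_neg (by simpa using hpa)] at hf
      rcases List.mem_cons.mp ht with rfl | ht
      · exact absurd hpt hpa
      · exact ih hl hf t ht hpt

-- characterisation of A's fold: it returns either the untouched accumulator (nothing beat r)
-- or the first element attaining the minimum rank among those below r
lemma loop_spec (l : List String) (b : Option String) (r : Int) :
    (l.foldl (fun (st : Option String × Int) term =>
        if pvRank term < st.2 then (some term, pvRank term) else st) (b, r)
      = (b, r) ∧ ∀ t ∈ l, r ≤ pvRank t) ∨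
    (∃ l1 t l2, l = l1 ++ t :: l2 ∧
      l.foldl (fun (st : Option String × Int) term =>
        if pvRank term < st.2 then (some term, pvRank term) else st) (b, r) = (some t, pvRank t) ∧
      pvRank t < r ∧ (∀ u ∈ l1, pvRank t < pvRank u) ∧ (∀ u ∈ l2, pvRank t ≤ pvRank u)) := by
  induction l generalizing b r with
  | nil => exact Or.inl ⟨rfl, by simp⟩
  | cons a l ih =>
    simp only [List.foldl_cons]
    by_cases h : pvRank a < r
    · rw [if_pos h]
      rcases ih (some a) (pvRank a) with ⟨heq, hall⟩ | ⟨l1, t, l2, heq, hres, hlt, hl1, hl2⟩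
      · exact Or.inr ⟨[], a, l, by simp, heq, h, by simp, hall⟩
      · refine Or.inr ⟨a :: l1, t, l2, by simp [heq], hres, lt_trans hlt h, ?_, hl2⟩
        intro u hu
        rcases List.mem_cons.mp hu with rfl | hu
        · exact hlt
        · exact hl1 u hu
    · rw [if_neg h]
      rcases ih b r with ⟨heq, hall⟩ | ⟨l1, t, l2, heq, hres, hlt, hl1, hl2⟩
      · refine Or.inl ⟨heq, ?_⟩
        intro t ht
        rcases List.mem_cons.mp ht with rfl | ht
        · omega
        · exact hall t ht
      · refine Or.inr ⟨a :: l1, t, l2, by simp [heq], hres, hlt, ?_, hl2⟩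
        intro u hu
        rcases List.mem_cons.mp hu with rfl | hu
        · omega
        · exact hl1 u hu

lemma set_contains_iff (xs : List String) (x : String) :
    PySem.Set.contains (PySem.Set.ofList xs) x = true ↔ x ∈ xs := by
  simp [PySem.Set.contains, PySem.Set.mem_ofList]

-- ===== VERDICT (by name: the statement is the Claim_ definition above) =====
theorem most_severe_term_spec : Claim_equal_most_severe_term := by
  intro terms _
  unfold Spec_most_severe_term most_severe_term most_severe_term_alt
  by_cases hne : terms = []
  · simp [hne]
  · rw [if_neg hne, if_neg hne]
    have hfun : (fun (st : Option String × Int) term =>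
        let rank := SEVERITY_RANK.getD term (PySem.List.len SEVERITY_ORDER + 100)
        if rank < st.2 then (some term, rank) else st)
      = (fun (st : Option String × Int) term =>
        if pvRank term < st.2 then (some term, pvRank term) else st) := rfl
    rw [hfun]
    obtain ⟨h, ts, rfl⟩ : ∃ h ts, terms = h :: ts := by
      cases terms with
      | nil => exact absurd rfl hne
      | cons h ts => exact ⟨h, ts, rfl⟩
    rcases loop_spec (h :: ts) none (10 ^ 9) with ⟨_, hall⟩ | ⟨l1, t, l2, heq, hres, _, hl1, hl2⟩
    · have := hall h (by simp)
      have := pvRank_le h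
      omega
    · rw [hres]
      have htmem : t ∈ h :: ts := heq ▸ List.mem_append_right l1 (List.mem_cons_self ..)
      cases hf : SEVERITY_ORDER.find? (fun t => PySem.Set.contains (PySem.Set.ofList (h :: ts)) t) with
      | some s =>
        have hsOrd : s ∈ SEVERITY_ORDER := List.mem_of_find?_eq_some hf
        have hsTerms : s ∈ h :: ts := (set_contains_iff _ _).mp (List.find?_some hf)
        -- pvRank s ≤ pvRank t
        have h1 : pvRank s ≤ pvRank t := by
          by_cases htOrd : t ∈ SEVERITY_ORDER
          · exact find?_rank_min pvRank_pairwise hf t htOrd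
              ((set_contains_iff _ _).mpr htmem)
          · rw [pvRank_of_not_mem htOrd]
            exact le_of_lt (pvRank_lt_of_mem hsOrd)
        -- pvRank t ≤ pvRank s
        have h2 : pvRank t ≤ pvRank s := by
          rw [heq] at hsTerms
          rcases List.mem_append.mp hsTerms with hs1 | hs2
          · exact le_of_lt (hl1 s hs1)
          · rcases List.mem_cons.mp hs2 with rfl | hs2
            · exact le_refl _
            · exact hl2 s hs2
        have htOrd : t ∈ SEVERITY_ORDER :=
          pvRank_mem_of_lt (lt_of_le_of_lt (le_antisymm h2 h1).le (pvRank_lt_of_mem hsOrd))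
        exact congrArg some (pvRank_inj htOrd hsOrd (le_antisymm h2 h1))
      | none =>
        have hnone : ∀ s ∈ SEVERITY_ORDER, s ∉ (h :: ts) := by
          intro s hs hmem
          have := List.find?_eq_none.mp hf s hs
          exact this ((set_contains_iff _ _).mpr hmem)
        have hterm136 : ∀ u ∈ h :: ts, pvRank u = 136 := by
          intro u hu
          refine pvRank_of_not_mem (fun hord => hnone u hord hu)
        cases l1 with
        | nil =>
          simp only [List.nil_append] at heq
          cases heq
          rfl
        | cons a l1' =>
          exfalso
          have ha : a ∈ h :: ts := heq ▸ List.mem_append_left _ (List.mem_cons_self ..)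
          have := hl1 a (List.mem_cons_self ..)
          have h136a := hterm136 a ha
          have h136t := hterm136 t htmem
          omega
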